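-- pv_equiv track=rewrite | github.com/NiJingzhe/SimpleLLMFunc | SimpleLLMFunc/builtin/file_tools.py | _is_full_wildcard_regex
-- ===== SOURCE A (Python) =====
-- def _is_full_wildcard_regex(pattern: str) -> bool:
--     normalized = pattern.strip()
--     if normalized.startswith("(?s)"):
--         normalized = normalized[4:]
--     while normalized.startswith("^"):
--         normalized = normalized[1:]
--     while normalized.endswith("$"):
--         normalized = normalized[:-1]
--     return normalized in {".", ".*", ".+"}
-- ===== SOURCE B (Python) =====
-- import re
--
-- # One anchored structural regex instead of manual peeling: optional "(?s)" prefix,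
-- # any run of '^', a wildcard core, any run of '$'.
-- _FULL_WILDCARD_RE = re.compile(r'(?:\(\?s\))?\^*(?:\.\*|\.\+|\.)\$*')
--
--
-- def _is_full_wildcard_regex(pattern: str) -> bool:
--     return _FULL_WILDCARD_RE.fullmatch(pattern.strip()) is not None
-- ===== Notes on version B (the rewrite author's own statement) =====
-- stated objective: idiomatic
-- what changed: Replaced the manual normalization (strip '(?s)' prefix, while-loops peeling '^' and trailing '$', set membership) by a single anchored structural regex fullmatch r'(?:\(\?s\))?\^*(?:\.\*|\.\+|\.)\$*'.
import Mathlib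
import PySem

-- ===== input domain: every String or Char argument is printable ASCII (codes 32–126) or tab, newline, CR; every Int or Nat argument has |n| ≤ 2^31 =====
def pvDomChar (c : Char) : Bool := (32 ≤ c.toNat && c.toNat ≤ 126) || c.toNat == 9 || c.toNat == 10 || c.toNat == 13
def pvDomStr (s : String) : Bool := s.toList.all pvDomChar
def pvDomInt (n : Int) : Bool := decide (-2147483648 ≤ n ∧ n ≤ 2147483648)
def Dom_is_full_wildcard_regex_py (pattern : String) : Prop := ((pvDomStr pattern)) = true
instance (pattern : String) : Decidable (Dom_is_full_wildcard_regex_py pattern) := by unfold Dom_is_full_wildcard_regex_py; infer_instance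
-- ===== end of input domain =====

-- B replaces A's manual peeling loops by a single anchored structural regex match
-- (objective: idiomatic); same return value on every input.

-- ===== PORT A =====
-- while normalized.startswith("^"): normalized = normalized[1:]
def pvPeelCaret (s : List Char) : List Char :=
  if h : PySem.Chars.startswith s ['^'] then
    pvPeelCaret (PySem.List.slice s (some 1) none)
  else s
termination_by s.length
decreasing_by
  have hne : s ≠ [] := by
    intro hnil; subst hnil; simp [PySem.Chars.startswith_iff] at h
  rw [PySem.List.slice_from_one]
  cases s with
  | nil => exact absurd rfl hne
  | cons a t => simp

-- while normalized.endswith("$"): normalized = normalized[:-1]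
def pvPeelDollar (s : List Char) : List Char :=
  if h : PySem.Chars.endswith s ['$'] then
    pvPeelDollar (PySem.List.slice s none (some (-1)))
  else s
termination_by s.length
decreasing_by
  have hne : s ≠ [] := by
    intro hnil; subst hnil; simp [PySem.Chars.endswith_iff] at h
  rw [PySem.List.slice_to_neg_one]
  have : s.length ≠ 0 := by simpa using (List.length_pos_iff.mpr hne).ne'
  simp [List.length_dropLast]
  omega

def is_full_wildcard_regex_py (pattern : String) : Bool :=
  let n0 := PySem.Chars.strip pattern.toList
  let n1 := if PySem.Chars.startswith n0 "(?s)".toList then PySem.List.slice n0 (some 4) none else n0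
  let n2 := pvPeelCaret n1
  let n3 := pvPeelDollar n2
  n3 == ".".toList || n3 == ".*".toList || n3 == ".+".toList

-- ===== PORT B =====
-- Hand port of re.fullmatch(r'(?:\(\?s\))?\^*(?:\.\*|\.\+|\.)\$*', …): exact for this
-- fixed regex, because no alternative/quantifier choice can ever be revisited by
-- backtracking (no following piece can match '(' , '^' is never a core start, and after
-- the core only '$'s may remain).
def pvCoreMatch : List Char → Bool
  | '.' :: '*' :: rest => rest.all (· == '$')   -- \.\*  then \$* to the end
  | '.' :: '+' :: rest => rest.all (· == '$')   -- \.\+  then \$* to the end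
  | '.' :: rest => rest.all (· == '$')          -- \.    then \$* to the end
  | _ => false

def is_full_wildcard_regex_py_alt (pattern : String) : Bool :=
  let s := PySem.Chars.strip pattern.toList
  let s1 := if "(?s)".toList.isPrefixOf s then s.drop 4 else s  -- (?:\(\?s\))?
  pvCoreMatch (s1.dropWhile (· == '^'))                          -- \^* then the core

-- ===== PRECONDITION & SPEC =====
def Spec_is_full_wildcard_regex_py (pattern : String) (out : Bool) : Prop := out = is_full_wildcard_regex_py_alt pattern
instance (pattern : String) (out : Bool) : Decidable (Spec_is_full_wildcard_regex_py pattern out) := by unfold Spec_is_full_wildcard_regex_py; infer_instance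

-- ===== CLAIM (what is proved, stated in full; the proofs are below) =====
def Claim_equal_is_full_wildcard_regex_py : Prop := ∀ (pattern : String), Dom_is_full_wildcard_regex_py pattern → Spec_is_full_wildcard_regex_py pattern (is_full_wildcard_regex_py pattern)

-- ===== LEMMAS AND PROOFS =====

lemma pvPeelCaret_eq_dropWhile (s : List Char) : pvPeelCaret s = s.dropWhile (· == '^') := by
  induction s with
  | nil => rw [pvPeelCaret]; simp [PySem.Chars.startswith_iff]
  | cons a t ih =>
    rw [pvPeelCaret]
    by_cases ha : a = '^'
    · subst ha
      simp [PySem.Chars.startswith_iff, List.dropWhile, PySem.List.slice_from_one, ih]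
    · have hb : (a == '^') = false := by simp [ha]
      simp [PySem.Chars.startswith_iff, Ne.symm ha, List.prefix_cons_iff, List.dropWhile, hb]

lemma pvPeelDollar_append_dollars (u : List Char) (k : Nat) :
    pvPeelDollar (u ++ List.replicate k '$') = pvPeelDollar u := by
  induction k with
  | zero => simp
  | succ n ih =>
    rw [pvPeelDollar]
    have he : PySem.Chars.endswith (u ++ List.replicate (n+1) '$') ['$'] = true := by
      simp [PySem.Chars.endswith_iff, List.replicate_succ']
      exact ⟨u ++ List.replicate n '$', by simp⟩
    rw [dif_pos he, PySem.List.slice_to_neg_one]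
    have : (u ++ List.replicate (n+1) '$').dropLast = u ++ List.replicate n '$' := by
      rw [List.replicate_succ', ← List.append_assoc]
      simp
    rw [this, ih]

lemma pvPeelDollar_no_dollar (u : List Char) (h : u.getLast? ≠ some '$') :
    pvPeelDollar u = u := by
  rw [pvPeelDollar]
  have : ¬ PySem.Chars.endswith u ['$'] = true := by
    simp only [PySem.Chars.endswith_iff]
    intro hsuf
    rcases hsuf with ⟨v, hv⟩
    apply h
    rw [← hv]
    simp [List.getLast?_append]
  simp [this]

lemma pvPeelDollar_decomp (s : List Char) :
    ∃ k, s = pvPeelDollar s ++ List.replicate k '$' ∧ (pvPeelDollar s).getLast? ≠ some '$' := by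
  induction hn : s.length using Nat.strong_induction_on generalizing s with
  | _ n ih =>
    rw [pvPeelDollar]
    by_cases h : PySem.Chars.endswith s ['$'] = true
    · rw [dif_pos h, PySem.List.slice_to_neg_one]
      have hne : s ≠ [] := by
        intro hnil; subst hnil; simp [PySem.Chars.endswith_iff] at h
      have hlen : s.dropLast.length < n := by
        subst hn
        have : s.length ≠ 0 := by simpa using (List.length_pos_iff.mpr hne).ne'
        simp; omega
      obtain ⟨k, hk, hl⟩ := ih _ hlen s.dropLast rfl
      refine ⟨k + 1, ?_, hl⟩
      have hlast : s.getLast? = some '$' := by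
        rcases (PySem.Chars.endswith_iff _ _).mp h with ⟨v, hv⟩
        rw [← hv]; simp [List.getLast?_append]
      have hs : s = s.dropLast ++ ['$'] := by
        conv_lhs => rw [← List.dropLast_append_getLast? '$' hlast]
      rw [List.replicate_succ', ← List.append_assoc, ← hk]
      exact hs
    · rw [dif_neg h]
      refine ⟨0, by simp, ?_⟩
      intro hl
      apply h
      have hne : s ≠ [] := by intro hnil; subst hnil; simp at hl
      rw [PySem.Chars.endswith_iff]
      exact ⟨s.dropLast, List.dropLast_append_getLast? '$' hl⟩

-- the three cores, as a reusable predicate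
def pvIsCore (c : List Char) : Prop := c = ".".toList ∨ c = ".*".toList ∨ c = ".+".toList

lemma core_no_dollar (c : List Char) (h : pvIsCore c) : c.getLast? ≠ some '$' := by
  rcases h with h | h | h <;> subst h <;> decide

lemma peel_eq_iff (s : List Char) :
    (pvPeelDollar s == ".".toList || pvPeelDollar s == ".*".toList || pvPeelDollar s == ".+".toList) = true
      ↔ ∃ c k, pvIsCore c ∧ s = c ++ List.replicate k '$' := by
  constructor
  · intro h
    obtain ⟨k, hk, _⟩ := pvPeelDollar_decomp s
    refine ⟨pvPeelDollar s, k, ?_, hk⟩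
    simp only [Bool.or_eq_true, beq_iff_eq] at h
    unfold pvIsCore; tauto
  · rintro ⟨c, k, hc, rfl⟩
    rw [pvPeelDollar_append_dollars, pvPeelDollar_no_dollar c (core_no_dollar c hc)]
    rcases hc with h | h | h <;> subst h <;> decide

lemma all_dollar_iff (l : List Char) :
    l.all (· == '$') = true ↔ l = List.replicate l.length '$' := by
  rw [List.eq_replicate_iff]
  simp [List.all_eq_true]

lemma coreMatch_iff (t : List Char) :
    pvCoreMatch t = true ↔ ∃ c k, pvIsCore c ∧ t = c ++ List.replicate k '$' := by
  constructor
  · intro h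
    cases t with
    | nil => simp [pvCoreMatch] at h
    | cons a rest =>
      by_cases ha : a = '.'
      · subst ha
        cases rest with
        | nil => exact ⟨".".toList, 0, Or.inl rfl, by decide⟩
        | cons b r2 =>
          by_cases hb : b = '*'
          · subst hb
            refine ⟨".*".toList, r2.length, by unfold pvIsCore; tauto, ?_⟩
            have := (all_dollar_iff r2).mp (by simpa [pvCoreMatch] using h)
            simpa using this
          · by_cases hb2 : b = '+'
            · subst hb2
              refine ⟨".+".toList, r2.length, by unfold pvIsCore; tauto, ?_⟩
              have := (all_dollar_iff r2).mp (by simpa [pvCoreMatch] using h)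
              simpa using this
            · refine ⟨".".toList, (b :: r2).length, by unfold pvIsCore; tauto, ?_⟩
              have := (all_dollar_iff (b :: r2)).mp
                (by simpa [pvCoreMatch, hb, hb2] using h)
              simpa using this
      · simp [pvCoreMatch, ha] at h
  · rintro ⟨c, k, hc, rfl⟩
    rcases hc with h | h | h <;> subst h
    · cases k with
      | zero => decide
      | succ n =>
        show pvCoreMatch ('.' :: '$' :: List.replicate n '$') = true
        simp [pvCoreMatch]
    · simp [pvCoreMatch]
    · simp [pvCoreMatch]

lemma final_stage_eq (t : List Char) :
    (pvPeelDollar t == ".".toList || pvPeelDollar t == ".*".toList || pvPeelDollar t == ".+".toList)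
      = pvCoreMatch t := by
  by_cases h : ∃ c k, pvIsCore c ∧ t = c ++ List.replicate k '$'
  · rw [(peel_eq_iff t).mpr h, ((coreMatch_iff t).mpr h)]
  · have h1 : ¬ _ := h ∘ (peel_eq_iff t).mp
    have h2 : ¬ _ := h ∘ (coreMatch_iff t).mp
    rw [Bool.not_eq_true] at h1 h2
    rw [h1, h2]

-- ===== VERDICT (by name: the statement is the Claim_ definition above) =====
theorem is_full_wildcard_regex_py_spec : Claim_equal_is_full_wildcard_regex_py := by
  intro pattern _
  unfold Spec_is_full_wildcard_regex_py is_full_wildcard_regex_py is_full_wildcard_regex_py_alt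
  simp only []
  have hpre : PySem.Chars.startswith (PySem.Chars.strip pattern.toList) "(?s)".toList
      = "(?s)".toList.isPrefixOf (PySem.Chars.strip pattern.toList) := by
    rw [Bool.eq_iff_iff, PySem.Chars.startswith_iff, List.isPrefixOf_iff_prefix]
  rw [hpre]
  have hslice : PySem.List.slice (PySem.Chars.strip pattern.toList) (some (4 : Int)) none
      = (PySem.Chars.strip pattern.toList).drop 4 := by
    have := PySem.List.slice_from_natCast (PySem.Chars.strip pattern.toList) 4
    simpa using this
  rw [hslice, pvPeelCaret_eq_dropWhile, final_stage_eq]
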